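-- pv_equiv track=rewrite | github.com/WYT10/vision_app | training_tools/prepare_cls_dataset.py | safe_name
-- ===== SOURCE A (Python) =====
-- def safe_name(name: str) -> str:
--     s = name.strip()
--     repl = {
--         " ": "_", "-": "_", "/": "_", "\\": "_", "(": "", ")": "", "[": "", "]": "",
--         "{": "", "}": "", ".": "_", ",": "_", ":": "_", ";": "_", "'": "", '"': "",
--         "+": "plus", "#": "sharp",
--     }
--     for k, v in repl.items():
--         s = s.replace(k, v)
--     return s
-- ===== SOURCE B (Python) =====
-- def safe_name(name: str) -> str:
--     out = []
--     for ch in name.strip():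
--         if ch in " -/\\.,:;":
--             out.append("_")
--         elif ch in "()[]{}'\"":
--             out.append("")
--         elif ch == "+":
--             out.append("plus")
--         elif ch == "#":
--             out.append("sharp")
--         else:
--             out.append(ch)
--     return "".join(out)
-- ===== Notes on version B (the rewrite author's own statement) =====
-- stated objective: alternative
-- what changed: Replaced A's 18 sequential full-string .replace passes with a single pass over the stripped string's characters, appending each character's replacement (via an if/elif branch) and joining once.
import Mathlib
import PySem

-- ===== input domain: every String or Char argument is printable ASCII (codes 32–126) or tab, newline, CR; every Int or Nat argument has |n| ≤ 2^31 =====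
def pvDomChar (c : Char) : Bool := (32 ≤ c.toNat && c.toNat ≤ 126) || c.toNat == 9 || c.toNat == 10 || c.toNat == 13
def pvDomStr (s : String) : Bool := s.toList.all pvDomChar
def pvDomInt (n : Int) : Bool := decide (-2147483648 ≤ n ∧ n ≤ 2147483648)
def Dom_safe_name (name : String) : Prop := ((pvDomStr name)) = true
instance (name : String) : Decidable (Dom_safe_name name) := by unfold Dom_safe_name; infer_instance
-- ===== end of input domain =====

-- B replaces A's 18 sequential full-string replace passes by one pass over the characters
-- (per-character branch, join at the end); objective: alternative single-pass algorithm.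


-- ===== PORT A =====
-- the dict literal `repl` of A, in insertion order
def replPairs : List (String × String) :=
  [(" ", "_"), ("-", "_"), ("/", "_"), ("\\", "_"), ("(", ""), (")", ""), ("[", ""), ("]", ""),
   ("{", ""), ("}", ""), (".", "_"), (",", "_"), (":", "_"), (";", "_"), ("'", ""), ("\"", ""),
   ("+", "plus"), ("#", "sharp")]

-- `for k, v in repl.items(): s = s.replace(k, v)` over the dict built from replPairs
def safe_name (name : String) : String :=
  (PySem.Dict.ofList replPairs).items.foldl
    (fun s kv => PySem.Str.replace s kv.1 kv.2) (PySem.Str.strip name)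

-- ===== PORT B =====
-- `ch in " -/\\.,:;"`: membership of the single character in the literal string (exact as char-list membership)
def bKeysUnd : List Char := (" -/\\.,:;" : String).toList
def bKeysDel : List Char := ("()[]{}'\"" : String).toList

-- the body of B's per-character if/elif chain
def bMapCh (ch : Char) : String :=
  if bKeysUnd.contains ch then "_"
  else if bKeysDel.contains ch then ""
  else if ch = '+' then "plus"
  else if ch = '#' then "sharp"
  else String.ofList [ch]

-- `out = []; for ch in name.strip(): out.append(...); return "".join(out)`
def safe_name_alt (name : String) : String :=
  PySem.Str.join "" ((PySem.Str.strip name).toList.map bMapCh)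

-- ===== PRECONDITION & SPEC =====
def Spec_safe_name (name : String) (out : String) : Prop := out = safe_name_alt name
instance (name : String) (out : String) : Decidable (Spec_safe_name name out) := by unfold Spec_safe_name; infer_instance

-- ===== CLAIM (what is proved, stated in full; the proofs are below) =====
def Claim_equal_safe_name : Prop := ∀ (name : String), Dom_safe_name name → Spec_safe_name name (safe_name name)

-- ===== LEMMAS AND PROOFS =====

-- one Python replace step with a single-char pattern, as a per-character expansion
def repl1 (k : Char) (v : List Char) (c : Char) : List Char := if c = k then v else [c]

theorem go_single (k : Char) (v : List Char) :
    ∀ (fuel : Nat) (l acc : List Char), l.length ≤ fuel →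
      PySem.Chars.replace.go [k] v fuel l acc = acc.reverse ++ l.flatMap (repl1 k v) := by
  intro fuel
  induction fuel with
  | zero =>
    intro l acc h
    have hl : l = [] := List.eq_nil_of_length_eq_zero (Nat.le_zero.mp h)
    subst hl
    rw [PySem.Chars.replace.go.eq_def]
    simp
  | succ n ih =>
    intro l acc h
    cases l with
    | nil =>
      rw [PySem.Chars.replace.go.eq_def]
      simp
    | cons c t =>
      rw [PySem.Chars.replace.go.eq_def]
      simp only [List.isPrefixOf, List.flatMap_cons]
      by_cases hc : k == c
      · have hck : c = k := ((beq_iff_eq).mp hc).symm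
        simp only [hc, Bool.true_and, if_true, List.length_cons,
          List.length_nil, List.drop_succ_cons, List.drop_zero]
        rw [ih t (v.reverse ++ acc) (by simpa using Nat.le_of_succ_le_succ h)]
        simp [repl1, hck]
      · have hck : ¬ c = k := fun e => hc (by simp [e])
        simp only [hc, Bool.false_and, Bool.false_eq_true, if_false]
        rw [ih t (c :: acc) (by simpa using Nat.le_of_succ_le_succ h)]
        simp [repl1, hck]

theorem replace_single (cs : List Char) (k : Char) (v : List Char) :
    PySem.Chars.replace cs [k] v = cs.flatMap (repl1 k v) := by
  unfold PySem.Chars.replace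
  simp only [List.isEmpty_cons, Bool.false_eq_true, if_false]
  exact go_single k v cs.length cs [] (Nat.le_refl _)

theorem join_empty (parts : List (List Char)) :
    PySem.Chars.join [] parts = parts.flatten := by
  induction parts with
  | nil => simp [PySem.Chars.join_nil]
  | cons p rest ih =>
    cases rest with
    | nil => simp [PySem.Chars.join_singleton]
    | cons q r => rw [PySem.Chars.join_cons_cons]; simp_all

set_option maxHeartbeats 2000000 in
theorem main_lists (cs : List Char) :
    PySem.Chars.replace (PySem.Chars.replace (PySem.Chars.replace (PySem.Chars.replace
      (PySem.Chars.replace (PySem.Chars.replace (PySem.Chars.replace (PySem.Chars.replace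
      (PySem.Chars.replace (PySem.Chars.replace (PySem.Chars.replace (PySem.Chars.replace
      (PySem.Chars.replace (PySem.Chars.replace (PySem.Chars.replace (PySem.Chars.replace
      (PySem.Chars.replace (PySem.Chars.replace cs [' '] ['_']) ['-'] ['_']) ['/'] ['_'])
      ['\\'] ['_']) ['('] []) [')'] []) ['['] []) [']'] []) ['{'] []) ['}'] []) ['.'] ['_'])
      [','] ['_']) [':'] ['_']) [';'] ['_']) ['\''] []) ['"'] []) ['+'] ['p', 'l', 'u', 's'])
      ['#'] ['s', 'h', 'a', 'r', 'p']
    = cs.flatMap (fun c => (bMapCh c).toList) := by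
  simp only [replace_single, List.flatMap_assoc]
  congr 1
  funext c
  by_cases hmem : c ∈ ([' ', '-', '/', '\\', '(', ')', '[', ']', '{', '}', '.', ',', ':', ';',
      '\'', '"', '+', '#'] : List Char)
  · fin_cases hmem <;> decide
  · simp only [List.mem_cons, List.not_mem_nil, or_false, not_or] at hmem
    obtain ⟨h1, h2, h3, h4, h5, h6, h7, h8, h9, h10, h11, h12, h13, h14, h15, h16, h17, h18⟩ := hmem
    simp [repl1, bMapCh, bKeysUnd, bKeysDel, h1, h2, h3, h4, h5, h6, h7, h8, h9, h10, h11,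
      h12, h13, h14, h15, h16, h17, h18]

-- ===== VERDICT (by name: the statement is the Claim_ definition above) =====
set_option maxHeartbeats 2000000 in
theorem safe_name_spec : Claim_equal_safe_name := by
  intro name _
  unfold Spec_safe_name safe_name safe_name_alt
  rw [← String.toList_inj]
  have hitems : (PySem.Dict.ofList replPairs).items = replPairs := by decide
  rw [hitems]
  simp only [replPairs, List.foldl_cons, List.foldl_nil]
  rw [PySem.Str.toList_join]
  simp only [PySem.Str.toList_replace]
  simp only [show (" " : String).toList = [' '] from rfl,
    show ("-" : String).toList = ['-'] from rfl,
    show ("/" : String).toList = ['/'] from rfl,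
    show ("\\" : String).toList = ['\\'] from rfl,
    show ("(" : String).toList = ['('] from rfl,
    show (")" : String).toList = [')'] from rfl,
    show ("[" : String).toList = ['['] from rfl,
    show ("]" : String).toList = [']'] from rfl,
    show ("{" : String).toList = ['{'] from rfl,
    show ("}" : String).toList = ['}'] from rfl,
    show ("." : String).toList = ['.'] from rfl,
    show ("," : String).toList = [','] from rfl,
    show (":" : String).toList = [':'] from rfl,
    show (";" : String).toList = [';'] from rfl,
    show ("'" : String).toList = ['\''] from rfl,
    show ("\"" : String).toList = ['"'] from rfl,
    show ("+" : String).toList = ['+'] from rfl,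
    show ("#" : String).toList = ['#'] from rfl,
    show ("_" : String).toList = ['_'] from rfl,
    show ("" : String).toList = ([] : List Char) from rfl,
    show ("plus" : String).toList = ['p', 'l', 'u', 's'] from rfl,
    show ("sharp" : String).toList = ['s', 'h', 'a', 'r', 'p'] from rfl]
  rw [join_empty, List.map_map, main_lists (PySem.Str.strip name).toList]
  simp [List.flatMap_def, Function.comp_def]
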